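-- pv_equiv track=rewrite | github.com/huuthieu/aeroeyes-bluemind | process_public_test.py | group_detections_by_intervals
-- ===== SOURCE A (Python) =====
-- from typing import List, Dict, Any
--
-- def group_detections_by_intervals(
--     detections_per_frame: Dict[int, List[Dict]]
-- ) -> List[List[Dict]]:
--     """
--     Group consecutive frame detections into intervals
--
--     Args:
--         detections_per_frame: Dict mapping frame number to list of detections
--
--     Returns:
--         List of intervals, each interval is a list of bbox dicts
--     """
--     if not detections_per_frame:
--         return []
--
--     # Sort frames
--     sorted_frames = sorted(detections_per_frame.keys())
--
--     intervals = []
--     current_interval = []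
--     last_frame = None
--
--     for frame in sorted_frames:
--         detections = detections_per_frame[frame]
--
--         if not detections:
--             # No detections in this frame
--             if current_interval:
--                 intervals.append(current_interval)
--                 current_interval = []
--             last_frame = None
--             continue
--
--         # Check if this frame is consecutive with previous
--         if last_frame is not None and frame - last_frame > 1:
--             # Gap detected, start new interval
--             if current_interval:
--                 intervals.append(current_interval)
--             current_interval = []
--
--         # Add all detections from this frame
--         for det in detections:
--             bbox = det.get("bbox", {})
--             current_interval.append({
--                 "frame": frame,
--                 "x1": int(bbox.get("x1", 0)),
--                 "y1": int(bbox.get("y1", 0)),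
--                 "x2": int(bbox.get("x2", 0)),
--                 "y2": int(bbox.get("y2", 0))
--             })
--
--         last_frame = frame
--
--     # Add last interval if exists
--     if current_interval:
--         intervals.append(current_interval)
--
--     return intervals
-- ===== SOURCE B (Python) =====
-- def group_detections_by_intervals(detections_per_frame):
--     """Filter-then-group re-implementation: keep only frames with detections,
--     split the sorted frame list into maximal runs of consecutive integers,
--     then expand each run into its interval of bbox dicts."""
--
--     def proc(frame):
--         return [
--             {
--                 "frame": frame,
--                 "x1": int(det.get("bbox", {}).get("x1", 0)),
--                 "y1": int(det.get("bbox", {}).get("y1", 0)),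
--                 "x2": int(det.get("bbox", {}).get("x2", 0)),
--                 "y2": int(det.get("bbox", {}).get("y2", 0)),
--             }
--             for det in detections_per_frame[frame]
--         ]
--
--     frames = [f for f in sorted(detections_per_frame) if detections_per_frame[f]]
--
--     runs = []
--     for f in frames:
--         if runs and f - runs[-1][-1] == 1:
--             runs[-1].append(f)
--         else:
--             runs.append([f])
--
--     return [[d for f in run for d in proc(f)] for run in runs]
-- ===== Notes on version B (the rewrite author's own statement) =====
-- stated objective: idiomatic
-- what changed: A interleaves gap detection, empty-frame resets and bbox expansion in one stateful loop over the sorted frames; B is a three-stage pipeline: filter out empty frames, split the sorted frame list into maximal runs of consecutive integers, then expand each run into its list of bbox dicts.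
import Mathlib
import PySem

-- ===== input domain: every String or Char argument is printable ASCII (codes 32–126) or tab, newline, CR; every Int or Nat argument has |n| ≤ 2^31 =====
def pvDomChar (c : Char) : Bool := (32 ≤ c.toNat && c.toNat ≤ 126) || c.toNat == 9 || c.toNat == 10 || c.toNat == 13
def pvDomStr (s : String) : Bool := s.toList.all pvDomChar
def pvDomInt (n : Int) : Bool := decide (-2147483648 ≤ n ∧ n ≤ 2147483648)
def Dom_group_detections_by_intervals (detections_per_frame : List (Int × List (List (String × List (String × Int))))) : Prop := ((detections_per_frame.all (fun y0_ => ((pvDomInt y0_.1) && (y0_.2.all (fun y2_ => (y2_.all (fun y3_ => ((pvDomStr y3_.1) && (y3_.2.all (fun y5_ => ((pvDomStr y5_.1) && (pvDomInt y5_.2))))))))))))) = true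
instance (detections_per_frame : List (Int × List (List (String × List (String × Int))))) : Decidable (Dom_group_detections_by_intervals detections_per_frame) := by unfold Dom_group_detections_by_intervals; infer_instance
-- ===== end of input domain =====

-- B re-implements A as a filter-then-group pipeline (drop empty frames, split the sorted
-- frame list into maximal consecutive runs, expand each run); objective: simpler decomposition.

-- ===== PORT A =====
-- a detection det : List (String × List (String × Int)) is the dict {"bbox": {...}};
-- det.get("bbox", {}) / bbox.get("x1", 0) are first-match dict lookups; int() on an int is the identity.
def pvMkBox (frame : Int) (det : List (String × List (String × Int))) : List (String × Int) :=
  let bbox := PySem.Dict.getD (PySem.Dict.mk det) "bbox" []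
  [("frame", frame),
   ("x1", PySem.Dict.getD (PySem.Dict.mk bbox) "x1" 0),
   ("y1", PySem.Dict.getD (PySem.Dict.mk bbox) "y1" 0),
   ("x2", PySem.Dict.getD (PySem.Dict.mk bbox) "x2" 0),
   ("y2", PySem.Dict.getD (PySem.Dict.mk bbox) "y2" 0)]

-- literal transliteration of A: one fold over the sorted frames carrying
-- (intervals, current_interval, last_frame); detections_per_frame[frame] is total since
-- frame ranges over the dict's own keys.
def group_detections_by_intervals (detections_per_frame : List (Int × List (List (String × List (String × Int))))) : List (List (List (String × Int))) :=
  if detections_per_frame = [] then [] else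
  let d := PySem.Dict.ofList detections_per_frame
  let sorted_frames := PySem.List.sorted (PySem.Dict.keys d) (fun x => x) false
  let st := sorted_frames.foldl
    (fun (st : List (List (List (String × Int))) × List (List (String × Int)) × Option Int) frame =>
      let intervals := st.1
      let current_interval := st.2.1
      let last_frame := st.2.2
      let detections := PySem.Dict.getD d frame []
      if detections = [] then
        (if current_interval ≠ [] then intervals ++ [current_interval] else intervals, [], none)
      else
        let p : List (List (List (String × Int))) × List (List (String × Int)) :=
          match last_frame with
          | some lf =>
            if frame - lf > 1 then
              ((if current_interval ≠ [] then intervals ++ [current_interval] else intervals), [])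
            else (intervals, current_interval)
          | none => (intervals, current_interval)
        let current_interval := detections.foldl (fun ci det => ci ++ [pvMkBox frame det]) p.2
        (p.1, current_interval, some frame))
    ([], [], none)
  if st.2.1 ≠ [] then st.1 ++ [st.2.1] else st.1

-- ===== PORT B =====
-- port of proc: processed detections of one frame, as a map
def pvProc (d : PySem.Dict Int (List (List (String × List (String × Int))))) (frame : Int) : List (List (String × Int)) :=
  (PySem.Dict.getD d frame []).map (pvMkBox frame)

-- port of B's run-building loop: append f to the last run, or start a new run
def pvStepRun (runs : List (List Int)) (f : Int) : List (List Int) :=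
  if runs ≠ [] ∧ f - (runs.getLast!).getLast! = 1 then
    runs.dropLast ++ [runs.getLast! ++ [f]]
  else runs ++ [[f]]

def group_detections_by_intervals_alt (detections_per_frame : List (Int × List (List (String × List (String × Int))))) : List (List (List (String × Int))) :=
  let d := PySem.Dict.ofList detections_per_frame
  let frames := (PySem.List.sorted (PySem.Dict.keys d) (fun x => x) false).filter
    (fun f => !(PySem.Dict.getD d f [] == []))
  let runs := frames.foldl pvStepRun []
  runs.map (fun run => run.flatMap (pvProc d))

-- ===== PRECONDITION & SPEC =====
def Spec_group_detections_by_intervals (detections_per_frame : List (Int × List (List (String × List (String × Int))))) (out : List (List (List (String × Int)))) : Prop := out = group_detections_by_intervals_alt detections_per_frame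
instance (detections_per_frame : List (Int × List (List (String × List (String × Int))))) (out : List (List (List (String × Int)))) : Decidable (Spec_group_detections_by_intervals detections_per_frame out) := by unfold Spec_group_detections_by_intervals; infer_instance

-- ===== CLAIM (what is proved, stated in full; the proofs are below) =====
def Claim_equal_group_detections_by_intervals : Prop := ∀ (detections_per_frame : List (Int × List (List (String × List (String × Int))))), Dom_group_detections_by_intervals detections_per_frame → Spec_group_detections_by_intervals detections_per_frame (group_detections_by_intervals detections_per_frame)

-- ===== LEMMAS AND PROOFS =====

-- proof-only abbreviations: A's fold step, A's final flush, and the run-expansion map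
def pvStepA (d : PySem.Dict Int (List (List (String × List (String × Int)))))
    (st : List (List (List (String × Int))) × List (List (String × Int)) × Option Int)
    (frame : Int) : List (List (List (String × Int))) × List (List (String × Int)) × Option Int :=
  let intervals := st.1
  let current_interval := st.2.1
  let last_frame := st.2.2
  let detections := PySem.Dict.getD d frame []
  if detections = [] then
    (if current_interval ≠ [] then intervals ++ [current_interval] else intervals, [], none)
  else
    let p : List (List (List (String × Int))) × List (List (String × Int)) :=
      match last_frame with
      | some lf =>
        if frame - lf > 1 then
          ((if current_interval ≠ [] then intervals ++ [current_interval] else intervals), [])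
        else (intervals, current_interval)
      | none => (intervals, current_interval)
    let current_interval := detections.foldl (fun ci det => ci ++ [pvMkBox frame det]) p.2
    (p.1, current_interval, some frame)

def pvFinish (st : List (List (List (String × Int))) × List (List (String × Int)) × Option Int) :
    List (List (List (String × Int))) :=
  if st.2.1 ≠ [] then st.1 ++ [st.2.1] else st.1

def pvG (d : PySem.Dict Int (List (List (String × List (String × Int)))))
    (run : List Int) : List (List (String × Int)) := run.flatMap (pvProc d)

theorem pvGetLastConcat {α : Type} [Inhabited α] (l : List α) (a : α) : (l ++ [a]).getLast! = a := by
  induction l with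
  | nil => rfl
  | cons x xs ih => cases xs <;> simp_all [List.getLast!, List.getLast]

theorem pvGetLastSingleton {α : Type} [Inhabited α] (a : α) : ([a] : List α).getLast! = a := rfl

theorem pvSortedLt (l : List Int) (h : l.Nodup) :
    (PySem.List.sorted l (fun x => x) false).Pairwise (· < ·) := by
  have h2 := (PySem.List.sorted_perm l (fun x => x) false).nodup_iff.mpr h
  have h1 := PySem.List.sorted_pairwise l (fun x => x)
  exact (h1.and h2).imp (fun h => lt_of_le_of_ne h.1 h.2)

theorem pvFoldlPush {α β : Type} (h : α → β) (l : List α) (init : List β) :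
    l.foldl (fun a x => a ++ [h x]) init = init ++ l.map h := by
  induction l generalizing init with
  | nil => simp
  | cons x xs ih => simp [ih]

theorem pvGSingleton (d : PySem.Dict Int (List (List (String × List (String × Int))))) (f : Int) :
    pvG d [f] = pvProc d f := by simp [pvG]

theorem pvStepRunConcat (R : List (List Int)) (r : List Int) (f : Int) :
    pvStepRun (R ++ [r]) f =
      if f - r.getLast! = 1 then R ++ [r ++ [f]] else (R ++ [r]) ++ [[f]] := by
  simp [pvStepRun]


-- reductions of A's fold step, one per branch of A's code
theorem pvStepA_empty (d : PySem.Dict Int (List (List (String × List (String × Int)))))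
    (ints : List (List (List (String × Int)))) (cur : List (List (String × Int)))
    (last : Option Int) (f : Int) (hdet : PySem.Dict.getD d f [] = []) :
    pvStepA d (ints, cur, last) f
      = (if cur ≠ [] then ints ++ [cur] else ints, [], none) := by
  simp [pvStepA, hdet]

theorem pvStepA_none (d : PySem.Dict Int (List (List (String × List (String × Int)))))
    (ints : List (List (List (String × Int)))) (cur : List (List (String × Int)))
    (f : Int) (hdet : PySem.Dict.getD d f [] ≠ []) :
    pvStepA d (ints, cur, none) f = (ints, cur ++ pvProc d f, some f) := by
  simp only [pvStepA, if_neg hdet]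
  rw [pvFoldlPush]
  rfl

theorem pvStepA_nogap (d : PySem.Dict Int (List (List (String × List (String × Int)))))
    (ints : List (List (List (String × Int)))) (cur : List (List (String × Int)))
    (p f : Int) (hdet : PySem.Dict.getD d f [] ≠ []) (h : ¬ f - p > 1) :
    pvStepA d (ints, cur, some p) f = (ints, cur ++ pvProc d f, some f) := by
  simp only [pvStepA, if_neg hdet, if_neg h]
  rw [pvFoldlPush]
  rfl

theorem pvStepA_gap (d : PySem.Dict Int (List (List (String × List (String × Int)))))
    (ints : List (List (List (String × Int)))) (cur : List (List (String × Int)))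
    (p f : Int) (hdet : PySem.Dict.getD d f [] ≠ []) (h : f - p > 1) :
    pvStepA d (ints, cur, some p) f
      = (if cur ≠ [] then ints ++ [cur] else ints, pvProc d f, some f) := by
  simp only [pvStepA, if_neg hdet, if_pos h]
  rw [pvFoldlPush]
  rfl

-- the coupling invariant between A's fold state and B's run list, and the main induction
theorem pvMain (d : PySem.Dict Int (List (List (String × List (String × Int)))))
    (fs : List Int) :
    ∀ (ints : List (List (List (String × Int)))) (cur : List (List (String × Int)))
      (last : Option Int) (runs : List (List Int)),
    fs.Pairwise (· < ·) →
    ((cur = [] ∧ last = none ∧ ints = runs.map (pvG d) ∧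
        ∀ f ∈ fs, runs = [] ∨ (runs.getLast!).getLast! + 1 < f)
     ∨ (∃ R r, runs = R ++ [r] ∧ cur = pvG d r ∧ cur ≠ [] ∧ last = some r.getLast! ∧
        ints = R.map (pvG d) ∧ ∀ f ∈ fs, r.getLast! < f)) →
    pvFinish (fs.foldl (pvStepA d) (ints, cur, last)) =
      (fs.foldl (fun runs f => if (!(PySem.Dict.getD d f [] == [])) = true
          then pvStepRun runs f else runs) runs).map (pvG d) := by
  induction fs with
  | nil =>
    intro ints cur last runs _ hinv
    rcases hinv with ⟨hc, _, hi, _⟩ | ⟨R, r, hr, hc, hne, _, hi, _⟩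
    · simp [pvFinish, hc, hi]
    · rw [hc] at hne
      simp [pvFinish, hi, hr, hc, hne]
  | cons f fs ih =>
    intro ints cur last runs hpw hinv
    have hpw' : fs.Pairwise (· < ·) := hpw.tail
    have hhead : ∀ x ∈ fs, f < x := fun x hx => (List.pairwise_cons.mp hpw).1 x hx
    simp only [List.foldl_cons]
    by_cases hdet : PySem.Dict.getD d f [] = []
    · -- empty frame: A flushes/resets, B skips
      have hB : (if (!(PySem.Dict.getD d f [] == [])) = true
          then pvStepRun runs f else runs) = runs := by simp [hdet]
      rw [hB, pvStepA_empty d ints cur last f hdet]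
      rcases hinv with ⟨hc, _, hi, hfact⟩ | ⟨R, r, hr, hc, hne, _, hi, hfact⟩
      · rw [if_neg (by simp [hc])]
        exact ih ints [] none runs hpw'
          (Or.inl ⟨rfl, rfl, hi, fun x hx => hfact x (List.mem_cons_of_mem f hx)⟩)
      · rw [if_pos hne]
        refine ih (ints ++ [cur]) [] none runs hpw' (Or.inl ⟨rfl, rfl, ?_, ?_⟩)
        · simp [hi, hc, hr]
        · intro x hx
          right
          rw [hr, pvGetLastConcat]
          have h1 : r.getLast! < f := hfact f (List.mem_cons_self)
          have h2 : f < x := hhead x hx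
          omega
    · -- frame with detections
      have hproc : pvProc d f ≠ [] := by
        simpa [pvProc, List.map_eq_nil_iff] using hdet
      have hB : (if (!(PySem.Dict.getD d f [] == [])) = true
          then pvStepRun runs f else runs) = pvStepRun runs f := by
        simp [hdet]
      rw [hB]
      rcases hinv with ⟨hc, hl, hi, hfact⟩ | ⟨R, r, hr, hc, hne, hl, hi, hfact⟩
      · -- A starts a fresh interval; B starts a fresh run
        have hRuns : pvStepRun runs f = runs ++ [[f]] := by
          rcases hfact f (List.mem_cons_self) with hnil | hgap
          · simp [pvStepRun, hnil]
          · simp only [pvStepRun]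
            rw [if_neg]
            rintro ⟨-, heq⟩
            omega
        rw [hl, pvStepA_none d ints cur f hdet, hc, List.nil_append, hRuns]
        refine ih ints (pvProc d f) (some f) (runs ++ [[f]]) hpw'
          (Or.inr ⟨runs, [f], rfl, (pvGSingleton d f).symm, hproc, ?_, hi, ?_⟩)
        · rw [pvGetLastSingleton]
        · intro x hx
          rw [pvGetLastSingleton]
          exact hhead x hx
      · -- continuing state: gap check decides merge vs new interval/run
        have hlast : r.getLast! < f := hfact f (List.mem_cons_self)
        rw [hr, pvStepRunConcat, hl]
        by_cases hgap : f - r.getLast! = 1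
        · -- consecutive: merge into current interval / last run
          rw [pvStepA_nogap d ints cur r.getLast! f hdet (by omega), if_pos hgap]
          refine ih ints (cur ++ pvProc d f) (some f) (R ++ [r ++ [f]]) hpw'
            (Or.inr ⟨R, r ++ [f], rfl, ?_, ?_, ?_, hi, ?_⟩)
          · simp [hc, pvG]
          · simp [hne]
          · rw [pvGetLastConcat]
          · intro x hx
            rw [pvGetLastConcat]
            exact hhead x hx
        · -- gap: A flushes current interval, B opens a new run
          rw [pvStepA_gap d ints cur r.getLast! f hdet (by omega), if_pos hne, if_neg hgap]
          refine ih (ints ++ [cur]) (pvProc d f) (some f) ((R ++ [r]) ++ [[f]]) hpw'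
            (Or.inr ⟨R ++ [r], [f], rfl, (pvGSingleton d f).symm, hproc, ?_, ?_, ?_⟩)
          · rw [pvGetLastSingleton]
          · simp [hi, hc]
          · intro x hx
            rw [pvGetLastSingleton]
            exact hhead x hx

theorem pvA_eq (dpf : List (Int × List (List (String × List (String × Int))))) (h : dpf ≠ []) :
    group_detections_by_intervals dpf
      = pvFinish ((PySem.List.sorted (PySem.Dict.keys (PySem.Dict.ofList dpf)) (fun x => x)
          false).foldl (pvStepA (PySem.Dict.ofList dpf)) ([], [], none)) := by
  unfold group_detections_by_intervals
  rw [if_neg h]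
  rfl

theorem pvB_eq (dpf : List (Int × List (List (String × List (String × Int))))) :
    group_detections_by_intervals_alt dpf
      = (((PySem.List.sorted (PySem.Dict.keys (PySem.Dict.ofList dpf)) (fun x => x) false).filter
          (fun f => !(PySem.Dict.getD (PySem.Dict.ofList dpf) f [] == []))).foldl pvStepRun
          []).map (pvG (PySem.Dict.ofList dpf)) := rfl

-- ===== VERDICT (by name: the statement is the Claim_ definition above) =====
theorem group_detections_by_intervals_spec : Claim_equal_group_detections_by_intervals := by
  intro dpf _hdom
  unfold Spec_group_detections_by_intervals
  by_cases hnil : dpf = []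
  · subst hnil; rfl
  · rw [pvA_eq dpf hnil, pvB_eq dpf, List.foldl_filter]
    exact pvMain (PySem.Dict.ofList dpf)
      (PySem.List.sorted (PySem.Dict.keys (PySem.Dict.ofList dpf)) (fun x => x) false)
      [] [] none []
      (pvSortedLt _ (PySem.Dict.nodup_keys_ofList dpf))
      (Or.inl ⟨rfl, rfl, rfl, fun _ _ => Or.inl rfl⟩)
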